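-- pv_equiv track=rewrite | github.com/cell-observatory/cell_observatory_finetune | models/ops/dcnv4_func.py | findspec
-- ===== SOURCE A (Python) =====
-- def factors(N):
--     """Returns the integer divisors of N as a list."""
--     res = []
--     for i in range(1, N+1):
--         if N % i == 0:
--             res.append(i)
--     return res
--
-- def findspec(B, D, H, W, G, C):
--     # key = f"{B}x{D}x{H}x{W}x{G}x{C}"
--     d_stride = 8
--     ms = factors(B*D*H*W)
--
--     multiplier = 1
--     for m in ms:
--         if m <= 64 and (m * G * C // d_stride) <= 512:
--             multiplier = m
--
--     n_thread = multiplier * G * C // d_stride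
--     # key = f"{B}x{D}x{H}x{W}x{G}x{C}"
--     return d_stride, n_thread
-- ===== SOURCE B (Python) =====
-- import math
--
-- def findspec(B, D, H, W, G, C):
--     d_stride = 8
--     N = B * D * H * W
--     best = 1
--     if N >= 1:
--         for i in range(1, math.isqrt(N) + 1):
--             if N % i == 0:
--                 for m in (i, N // i):
--                     if (m <= 64 and (m * G * C) // d_stride <= 512) and best < m:
--                         best = m
--     n_thread = best * G * C // d_stride
--     return d_stride, n_thread
-- ===== Notes on version B (the rewrite author's own statement) =====
-- stated objective: faster
-- what changed: Replaces the full 1..N divisor enumeration plus rescan with a single trial-division loop up to isqrt(N) that tracks the maximum qualifying divisor (considering both i and N//i) directly.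
import Mathlib
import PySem

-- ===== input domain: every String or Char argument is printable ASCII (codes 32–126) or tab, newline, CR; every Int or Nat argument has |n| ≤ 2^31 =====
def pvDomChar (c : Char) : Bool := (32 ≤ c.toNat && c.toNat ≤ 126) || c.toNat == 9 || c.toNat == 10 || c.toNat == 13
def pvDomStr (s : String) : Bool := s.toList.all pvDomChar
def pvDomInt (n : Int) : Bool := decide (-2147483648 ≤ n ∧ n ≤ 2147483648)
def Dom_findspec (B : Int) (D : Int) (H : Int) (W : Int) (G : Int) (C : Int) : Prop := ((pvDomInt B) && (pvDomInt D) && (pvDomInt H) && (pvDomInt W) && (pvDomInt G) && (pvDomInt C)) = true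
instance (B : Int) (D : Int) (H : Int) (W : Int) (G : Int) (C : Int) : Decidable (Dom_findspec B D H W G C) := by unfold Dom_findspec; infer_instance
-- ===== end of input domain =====

-- B replaces the O(N) divisor enumeration (N = B*D*H*W) with trial division up to isqrt(N),
-- tracking the maximum qualifying divisor directly (objective: faster, asymptotic).

-- ===== PORT A =====
-- factors(N): loop i in range(1, N+1), append i when N % i == 0
def pvFactors (N : Int) : List Int :=
  (PySem.List.pyRange 1 (N + 1) 1).foldl
    (fun res i => if PySem.Int.mod N i = 0 then res ++ [i] else res) []

def findspec (B : Int) (D : Int) (H : Int) (W : Int) (G : Int) (C : Int) : List Int :=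
  let d_stride : Int := 8
  let ms := pvFactors (B * D * H * W)
  let multiplier := ms.foldl
    (fun mult m => if m ≤ 64 ∧ PySem.Int.floordiv (m * G * C) d_stride ≤ 512 then m else mult) 1
  let n_thread := PySem.Int.floordiv (multiplier * G * C) d_stride
  [d_stride, n_thread]

-- ===== PORT B =====
-- best = max qualifying divisor of N, found by trial division up to isqrt(N) (default 1)
def pvBestMult (N : Int) (G : Int) (C : Int) : Int :=
  if 1 ≤ N then
    (PySem.List.pyRange 1 ((Nat.sqrt N.toNat : Int) + 1) 1).foldl
      (fun best i =>
        if PySem.Int.mod N i = 0 then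
          [i, PySem.Int.floordiv N i].foldl
            (fun b m =>
              if (m ≤ 64 ∧ PySem.Int.floordiv (m * G * C) 8 ≤ 512) ∧ b < m then m else b) best
        else best) 1
  else 1

def findspec_alt (B : Int) (D : Int) (H : Int) (W : Int) (G : Int) (C : Int) : List Int :=
  let d_stride : Int := 8
  let best := pvBestMult (B * D * H * W) G C
  [d_stride, PySem.Int.floordiv (best * G * C) d_stride]

-- ===== PRECONDITION & SPEC =====
def Spec_findspec (B : Int) (D : Int) (H : Int) (W : Int) (G : Int) (C : Int) (out : List Int) : Prop := out = findspec_alt B D H W G C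
instance (B : Int) (D : Int) (H : Int) (W : Int) (G : Int) (C : Int) (out : List Int) : Decidable (Spec_findspec B D H W G C out) := by unfold Spec_findspec; infer_instance

-- ===== CLAIM (what is proved, stated in full; the proofs are below) =====
def Claim_equal_findspec : Prop := ∀ (B : Int) (D : Int) (H : Int) (W : Int) (G : Int) (C : Int), Dom_findspec B D H W G C → Spec_findspec B D H W G C (findspec B D H W G C)

-- ===== LEMMAS AND PROOFS =====

-- "last qualifying element" step (A) and "max qualifying element" step (B), abstracted
def pvStepLast (p : Int → Bool) (acc m : Int) : Int := if p m then m else acc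
def pvStepMax (p : Int → Bool) (b m : Int) : Int := if p m then max b m else b

lemma pv_last_eq_max (p : Int → Bool) (l : List Int) (a : Int)
    (ha : ∀ x ∈ l, a ≤ x) (hs : l.Pairwise (· ≤ ·)) :
    l.foldl (pvStepLast p) a = l.foldl (pvStepMax p) a := by
  induction l generalizing a with
  | nil => rfl
  | cons m t ih =>
    have ham : a ≤ m := ha m (by simp)
    have hmt : ∀ x ∈ t, m ≤ x := (List.pairwise_cons.mp hs).1
    have hstep : pvStepLast p a m = pvStepMax p a m := by
      unfold pvStepLast pvStepMax
      by_cases hp : p m <;> simp [hp, max_eq_right ham]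
    simp only [List.foldl_cons, hstep]
    refine ih (pvStepMax p a m) ?_ ((List.pairwise_cons.mp hs).2)
    intro x hx
    have h1 := ha x (List.mem_cons_of_mem _ hx)
    have h2 := hmt x hx
    unfold pvStepMax
    by_cases hp : p m <;> simp [hp] <;> omega

lemma pv_le_foldl_max (p : Int → Bool) (l : List Int) (a : Int) :
    a ≤ l.foldl (pvStepMax p) a := by
  induction l generalizing a with
  | nil => exact le_refl a
  | cons m t ih =>
    refine le_trans ?_ (ih (pvStepMax p a m))
    unfold pvStepMax
    by_cases hp : p m <;> simp [hp]

lemma pv_mem_le_foldl_max (p : Int → Bool) (l : List Int) (a x : Int)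
    (hx : x ∈ l) (hp : p x = true) : x ≤ l.foldl (pvStepMax p) a := by
  induction l generalizing a with
  | nil => cases hx
  | cons m t ih =>
    rcases List.mem_cons.mp hx with rfl | hxt
    · refine le_trans ?_ (pv_le_foldl_max p t (pvStepMax p a x))
      unfold pvStepMax
      simp [hp]
    · exact ih (pvStepMax p a m) hxt

lemma pv_foldl_max_cases (p : Int → Bool) (l : List Int) (a : Int) :
    l.foldl (pvStepMax p) a = a ∨
      (l.foldl (pvStepMax p) a ∈ l ∧ p (l.foldl (pvStepMax p) a) = true) := by
  induction l generalizing a with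
  | nil => left; rfl
  | cons m t ih =>
    simp only [List.foldl_cons]
    rcases ih (pvStepMax p a m) with h | ⟨hmem, hq⟩
    · rw [h]
      unfold pvStepMax
      by_cases hp : p m
      · rcases le_total a m with hle | hle
        · right
          constructor
          · simp [hp, max_eq_right hle]
          · simp [hp, max_eq_right hle]
        · left; simp [hp, max_eq_left hle]
      · left; simp [hp]
    · right; exact ⟨List.mem_cons_of_mem _ hmem, hq⟩

lemma pv_foldl_max_set_congr (p : Int → Bool) (l1 l2 : List Int) (a : Int)
    (h : ∀ x, p x = true → (x ∈ l1 ↔ x ∈ l2)) :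
    l1.foldl (pvStepMax p) a = l2.foldl (pvStepMax p) a := by
  apply le_antisymm
  · rcases pv_foldl_max_cases p l1 a with he | ⟨hmem, hq⟩
    · rw [he]; exact pv_le_foldl_max p l2 a
    · exact pv_mem_le_foldl_max p l2 a _ ((h _ hq).mp hmem) hq
  · rcases pv_foldl_max_cases p l2 a with he | ⟨hmem, hq⟩
    · rw [he]; exact pv_le_foldl_max p l1 a
    · exact pv_mem_le_foldl_max p l1 a _ ((h _ hq).mpr hmem) hq

lemma pv_foldl_flat (p : Int → Bool) (g : Int → List Int) (l : List Int) (a : Int) :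
    l.foldl (fun b i => (g i).foldl (pvStepMax p) b) a
      = (l.flatMap g).foldl (pvStepMax p) a := by
  induction l generalizing a with
  | nil => rfl
  | cons m t ih => simp only [List.foldl_cons, List.flatMap_cons, List.foldl_append, ih]

-- the sqrt pairing fact on ℕ
lemma pv_div_le_sqrt (nn d : ℕ) (_hd : d ∣ nn) (hgt : Nat.sqrt nn < d) (_hpos : 0 < d) :
    nn / d ≤ Nat.sqrt nn := by
  have h1 : nn / d * d ≤ nn := Nat.div_mul_le_self nn d
  have h2 : nn < (Nat.sqrt nn + 1) * (Nat.sqrt nn + 1) := Nat.lt_succ_sqrt nn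
  have h3 : (Nat.sqrt nn + 1) * (Nat.sqrt nn + 1) ≤ (Nat.sqrt nn + 1) * d :=
    Nat.mul_le_mul_left _ hgt
  have : nn / d * d < (Nat.sqrt nn + 1) * d := by omega
  have := Nat.lt_of_mul_lt_mul_right this
  omega

lemma pv_divisor_pair (nn d : ℕ) (h1 : 1 ≤ nn) (hd : d ∣ nn) (hdpos : 1 ≤ d) :
    ∃ i, 1 ≤ i ∧ i ≤ Nat.sqrt nn ∧ i ∣ nn ∧ (d = i ∨ d = nn / i) := by
  by_cases hle : d ≤ Nat.sqrt nn
  · exact ⟨d, hdpos, hle, hd, Or.inl rfl⟩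
  · have hdn : d ≤ nn := Nat.le_of_dvd (by omega) hd
    refine ⟨nn / d, ?_, ?_, ⟨d, (Nat.div_mul_cancel hd).symm⟩, Or.inr ?_⟩
    · exact (Nat.one_le_div_iff (by omega)).mpr hdn
    · exact pv_div_le_sqrt nn d hd (by omega) (by omega)
    · exact (Nat.div_div_self hd (by omega)).symm

-- the qualifying predicate, as a Bool
def pvQ (G C m : Int) : Bool := decide (m ≤ 64 ∧ PySem.Int.floordiv (m * G * C) 8 ≤ 512)

-- A's divisor list, B's candidate generator and flattened candidate list
def pvDl (N : Int) : List Int :=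
  (PySem.List.pyRange 1 (N + 1) 1).filter (fun i => decide (PySem.Int.mod N i = 0))
def pvG (N : Int) (i : Int) : List Int :=
  if PySem.Int.mod N i = 0 then [i, PySem.Int.floordiv N i] else []
def pvCl (N : Int) : List Int :=
  (PySem.List.pyRange 1 ((Nat.sqrt N.toNat : Int) + 1) 1).flatMap (pvG N)

lemma pv_foldl_filter (p : Int → Bool) (l acc : List Int) :
    l.foldl (fun res i => if p i then res ++ [i] else res) acc = acc ++ l.filter p := by
  induction l generalizing acc with
  | nil => simp
  | cons m t ih => by_cases h : p m <;> simp [h, ih]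

lemma pv_factors_eq (N : Int) : pvFactors N = pvDl N := by
  unfold pvFactors pvDl
  have h : (fun (res : List Int) (i : Int) => if PySem.Int.mod N i = 0 then res ++ [i] else res)
      = (fun (res : List Int) (i : Int) =>
          if (fun j => decide (PySem.Int.mod N j = 0)) i then res ++ [i] else res) := by
    funext res i
    by_cases h : PySem.Int.mod N i = 0 <;> simp [h]
  rw [h, pv_foldl_filter]
  simp

lemma pv_stepA_eq (G C : Int) :
    (fun (mult m : Int) => if m ≤ 64 ∧ PySem.Int.floordiv (m * G * C) 8 ≤ 512 then m else mult)
      = pvStepLast (pvQ G C) := by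
  funext mult m
  unfold pvStepLast pvQ
  by_cases h : m ≤ 64 ∧ PySem.Int.floordiv (m * G * C) 8 ≤ 512 <;> simp [h]

lemma pv_stepB_eq (G C : Int) :
    (fun (b m : Int) =>
        if (m ≤ 64 ∧ PySem.Int.floordiv (m * G * C) 8 ≤ 512) ∧ b < m then m else b)
      = pvStepMax (pvQ G C) := by
  funext b m
  unfold pvStepMax pvQ
  by_cases h : m ≤ 64 ∧ PySem.Int.floordiv (m * G * C) 8 ≤ 512 <;>
    by_cases h2 : b < m <;> simp [h, h2] <;> omega

lemma pv_mem_dl (N x : Int) : x ∈ pvDl N ↔ (1 ≤ x ∧ x ≤ N ∧ x ∣ N) := by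
  unfold pvDl
  rw [List.mem_filter, PySem.List.mem_pyRange_one, decide_eq_true_eq,
    PySem.Int.mod_eq_zero_iff_dvd]
  constructor
  · rintro ⟨⟨h1, h2⟩, h3⟩; exact ⟨h1, by omega, h3⟩
  · rintro ⟨h1, h2, h3⟩; exact ⟨⟨h1, by omega⟩, h3⟩

lemma pv_mem_cl (N x : Int) (h1 : 1 ≤ N) : x ∈ pvCl N ↔ (1 ≤ x ∧ x ≤ N ∧ x ∣ N) := by
  obtain ⟨nn, rfl⟩ : ∃ nn : ℕ, N = (nn : Int) := ⟨N.toNat, by omega⟩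
  have hnn : 1 ≤ nn := by exact_mod_cast h1
  unfold pvCl pvG
  simp only [List.mem_flatMap, PySem.List.mem_pyRange_one, Int.toNat_natCast]
  constructor
  · rintro ⟨i, ⟨hi1, hi2⟩, hx⟩
    by_cases hdvd : PySem.Int.mod (nn : Int) i = 0
    · rw [if_pos hdvd] at hx
      have hidvd : i ∣ (nn : Int) := (PySem.Int.mod_eq_zero_iff_dvd _ _).mp hdvd
      obtain ⟨ii, rfl⟩ : ∃ ii : ℕ, i = (ii : Int) := ⟨i.toNat, by omega⟩
      have hii : ii ∣ nn := by exact_mod_cast hidvd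
      have hiin : ii ≤ nn := Nat.le_of_dvd (by omega) hii
      have hq : nn / ii ∣ nn := ⟨ii, (Nat.div_mul_cancel hii).symm⟩
      have hq1 : 1 ≤ nn / ii := (Nat.one_le_div_iff (by exact_mod_cast hi1)).mpr hiin
      simp only [List.mem_cons, List.not_mem_nil, or_false] at hx
      rcases hx with rfl | rfl
      · exact ⟨hi1, by exact_mod_cast hiin, by exact_mod_cast hii⟩
      · rw [PySem.Int.floordiv_natCast]
        refine ⟨by exact_mod_cast hq1, by exact_mod_cast Nat.div_le_self nn ii, ?_⟩
        exact_mod_cast hq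
    · rw [if_neg hdvd] at hx
      simp at hx
  · rintro ⟨hx1, hx2, hx3⟩
    obtain ⟨d, rfl⟩ : ∃ d : ℕ, x = (d : Int) := ⟨x.toNat, by omega⟩
    have hd : d ∣ nn := by exact_mod_cast hx3
    obtain ⟨i, hi1, hi2, hidvd, hcase⟩ := pv_divisor_pair nn d hnn hd (by exact_mod_cast hx1)
    have hm : PySem.Int.mod (nn : Int) (i : Int) = 0 :=
      (PySem.Int.mod_eq_zero_iff_dvd _ _).mpr (by exact_mod_cast hidvd)
    refine ⟨(i : Int), ⟨by exact_mod_cast hi1, by omega⟩, ?_⟩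
    rw [if_pos hm]
    rcases hcase with rfl | h
    · simp
    · rw [PySem.Int.floordiv_natCast]
      simp [h]

lemma pv_mult_eq_best (N G C : Int) :
    (pvFactors N).foldl
        (fun mult m => if m ≤ 64 ∧ PySem.Int.floordiv (m * G * C) 8 ≤ 512 then m else mult) 1
      = pvBestMult N G C := by
  rw [pv_stepA_eq, pv_factors_eq]
  unfold pvBestMult
  by_cases h1 : 1 ≤ N
  · rw [if_pos h1]
    simp only [pv_stepB_eq G C]
    have houter : (fun (best i : Int) =>
          if PySem.Int.mod N i = 0 then
            [i, PySem.Int.floordiv N i].foldl (pvStepMax (pvQ G C)) best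
          else best)
        = fun (best i : Int) => (pvG N i).foldl (pvStepMax (pvQ G C)) best := by
      funext best i
      unfold pvG
      by_cases h : PySem.Int.mod N i = 0 <;> simp [h]
    rw [houter, pv_foldl_flat]
    have hcl : (PySem.List.pyRange 1 ((Nat.sqrt N.toNat : Int) + 1) 1).flatMap (pvG N)
        = pvCl N := rfl
    rw [hcl]
    have hinit : ∀ x ∈ pvDl N, (1 : Int) ≤ x := by
      intro x hx
      exact ((pv_mem_dl N x).mp hx).1
    have hsorted : (pvDl N).Pairwise (· ≤ ·) := by
      unfold pvDl
      exact ((PySem.List.pairwise_lt_pyRange_one 1 (N + 1)).filter _).imp le_of_lt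
    rw [pv_last_eq_max (pvQ G C) (pvDl N) 1 hinit hsorted]
    apply pv_foldl_max_set_congr
    intro x _
    rw [pv_mem_dl, pv_mem_cl N x h1]
  · rw [if_neg h1]
    have hnil : PySem.List.pyRange 1 (N + 1) 1 = [] :=
      PySem.List.pyRange_one_eq_nil (by omega)
    unfold pvDl
    rw [hnil]
    rfl

-- ===== VERDICT (by name: the statement is the Claim_ definition above) =====
theorem findspec_spec : Claim_equal_findspec := by
  intro B D H W G C _
  unfold Spec_findspec
  simp only [findspec, findspec_alt]
  rw [pv_mult_eq_best]
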